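-- pv_equiv track=rewrite | github.com/xjtu-L/GraphNetExtractAgent | scripts/extract_timm_batch.py | filter_missing_models
-- ===== SOURCE A (Python) =====
-- def is_model_exists(model_name, existing_models):
--     """检查模型是否已存在（包括名称包含关系检查）"""
--     # 直接匹配
--     if model_name in existing_models:
--         return True
--
--     # 检查名称包含关系（如 resnetrs101 vs resnetrs101.tf_in1k）
--     for existing in existing_models:
--         # 规范名称已存在（当前模型是带后缀的版本）
--         if model_name.startswith(existing + ".") or model_name.startswith(existing + "_"):
--             return True
--         # 带后缀版本已存在（当前模型是规范名称）
--         if existing.startswith(model_name + ".") or existing.startswith(model_name + "_"):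
--             return True
--
--     return False
--
-- def filter_missing_models(target_models, existing_models):
--     """过滤掉已存在的模型"""
--     missing = []
--     skipped = []
--
--     for model in target_models:
--         if is_model_exists(model, existing_models):
--             skipped.append(model)
--         else:
--             missing.append(model)
--
--     return missing, skipped
-- ===== SOURCE B (Python) =====
-- def filter_missing_models(target_models, existing_models):
--     """Filter out already-existing models using hash-set indexes built once."""
--     seps = ('.', '_')
--     exist = set(existing_models)
--     # every prefix of an existing name that ends right before a '.' or '_'
--     stems = {e[:i] for e in existing_models for i, ch in enumerate(e) if ch in seps}
--     missing, skipped = [], []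
--     for m in target_models:
--         hit = (m in exist or m in stems
--                or any(ch in seps and m[:i] in exist for i, ch in enumerate(m)))
--         (skipped if hit else missing).append(m)
--     return missing, skipped
-- ===== Notes on version B (the rewrite author's own statement) =====
-- stated objective: faster
-- what changed: B builds two hash sets once over existing_models (the names themselves and every prefix cut at a '.'/'_' separator) and decides each target by O(L) set lookups over its own separator positions, removing A's inner scan of existing_models per target.
import Mathlib
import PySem

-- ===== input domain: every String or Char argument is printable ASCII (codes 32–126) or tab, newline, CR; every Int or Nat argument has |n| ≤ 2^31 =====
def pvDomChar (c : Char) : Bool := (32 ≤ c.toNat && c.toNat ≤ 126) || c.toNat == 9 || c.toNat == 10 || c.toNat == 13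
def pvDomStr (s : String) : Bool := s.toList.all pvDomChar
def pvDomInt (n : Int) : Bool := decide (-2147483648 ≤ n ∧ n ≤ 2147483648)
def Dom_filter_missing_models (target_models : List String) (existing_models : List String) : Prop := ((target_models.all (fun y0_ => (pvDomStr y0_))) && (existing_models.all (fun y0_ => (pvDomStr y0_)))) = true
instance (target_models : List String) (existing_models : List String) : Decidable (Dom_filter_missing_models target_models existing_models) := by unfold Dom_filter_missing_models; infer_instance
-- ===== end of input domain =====

-- B replaces A's per-target scan of existing_models with hash-set indexes (the existing
-- names plus their separator-cut stems) built once; objective: faster.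


-- ===== PORT A =====
def is_model_exists (model_name : String) (existing_models : List String) : Bool :=
  if existing_models.contains model_name then true
  else
    existing_models.any (fun existing =>
      PySem.Chars.startswith model_name.toList (existing.toList ++ ['.']) ||
      PySem.Chars.startswith model_name.toList (existing.toList ++ ['_']) ||
      PySem.Chars.startswith existing.toList (model_name.toList ++ ['.']) ||
      PySem.Chars.startswith existing.toList (model_name.toList ++ ['_']))

def filter_missing_models (target_models : List String) (existing_models : List String) : List String × List String :=
  target_models.foldl
    (fun acc model =>
      if is_model_exists model existing_models then (acc.1, acc.2 ++ [model])
      else (acc.1 ++ [model], acc.2))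
    ([], [])

-- ===== PORT B =====
def pySeps : List Char := ['.', '_']

def stems_of (existing_models : List String) : PySem.Set String :=
  existing_models.foldl
    (fun s e =>
      (PySem.List.enumerate e.toList).foldl
        (fun s p =>
          if pySeps.contains p.2 then
            PySem.Set.add s (String.ofList (PySem.List.slice e.toList none (some p.1)))
          else s)
        s)
    PySem.Set.empty

def model_hit (exist : PySem.Set String) (stems : PySem.Set String) (m : String) : Bool :=
  PySem.Set.contains exist m || PySem.Set.contains stems m ||
    (PySem.List.enumerate m.toList).any (fun p =>
      pySeps.contains p.2 &&
      PySem.Set.contains exist (String.ofList (PySem.List.slice m.toList none (some p.1))))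

def filter_missing_models_alt (target_models : List String) (existing_models : List String) : List String × List String :=
  let exist := PySem.Set.ofList existing_models
  let stems := stems_of existing_models
  target_models.foldl
    (fun acc m =>
      if model_hit exist stems m then (acc.1, acc.2 ++ [m])
      else (acc.1 ++ [m], acc.2))
    ([], [])

-- ===== PRECONDITION & SPEC =====
def Spec_filter_missing_models (target_models : List String) (existing_models : List String) (out : List String × List String) : Prop := out = filter_missing_models_alt target_models existing_models
instance (target_models : List String) (existing_models : List String) (out : List String × List String) : Decidable (Spec_filter_missing_models target_models existing_models out) := by unfold Spec_filter_missing_models; infer_instance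

-- ===== CLAIM =====
def Claim_equal_filter_missing_models : Prop := ∀ (target_models : List String) (existing_models : List String), Dom_filter_missing_models target_models existing_models → Spec_filter_missing_models target_models existing_models (filter_missing_models target_models existing_models)

-- ===== LEMMAS AND PROOFS =====

theorem prefix_snoc_iff (e m : List Char) (c : Char) :
    (e ++ [c]) <+: m ↔ m.take e.length = e ∧ m[e.length]? = some c := by
  induction e generalizing m with
  | nil => cases m <;> simp [eq_comm]
  | cons a e ih =>
    cases m with
    | nil => simp
    | cons b t => simp [List.cons_prefix_cons, ih, and_assoc, eq_comm (a := b)]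

theorem mem_enumerate_iff (l : List Char) (k : Int) (p : Int × Char) :
    p ∈ PySem.List.enumerate l k ↔ ∃ j : Nat, l[j]? = some p.2 ∧ p.1 = k + j := by
  obtain ⟨p1, p2⟩ := p
  induction l generalizing k with
  | nil => simp [PySem.List.enumerate]
  | cons a t ih =>
    simp only [PySem.List.enumerate, List.mem_cons, ih]
    constructor
    · rintro (h | ⟨j, hj, hp⟩)
      · exact ⟨0, by simp [Prod.ext_iff] at h; simp [h.2], by simp [Prod.ext_iff] at h; simp [h.1]⟩
      · exact ⟨j + 1, by simpa using hj, by push_cast at hp ⊢; omega⟩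
    · rintro ⟨j, hj, hp⟩
      cases j with
      | zero =>
        left
        simp at hj hp
        simp [hj, hp]
      | succ j =>
        right
        exact ⟨j, by simpa using hj, by push_cast at hp ⊢; omega⟩

theorem mem_foldl_set {β : Type} (l : List β) (s : PySem.Set String)
    (g : PySem.Set String → β → PySem.Set String) (P : β → String → Prop) (x : String)
    (h : ∀ s b x, x ∈ g s b ↔ x ∈ s ∨ P b x) :
    x ∈ l.foldl g s ↔ x ∈ s ∨ ∃ b ∈ l, P b x := by
  induction l generalizing s with
  | nil => simp
  | cons b l ih =>
    simp only [List.foldl_cons, ih, h, List.mem_cons]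
    constructor
    · rintro ((hs | hb) | ⟨b', hb', hp⟩)
      · exact Or.inl hs
      · exact Or.inr ⟨b, Or.inl rfl, hb⟩
      · exact Or.inr ⟨b', Or.inr hb', hp⟩
    · rintro (hs | ⟨b', (rfl | hb'), hp⟩)
      · exact Or.inl (Or.inl hs)
      · exact Or.inl (Or.inr hp)
      · exact Or.inr ⟨b', hb', hp⟩

theorem mem_stems_iff (E : List String) (x : String) :
    x ∈ stems_of E ↔ ∃ e ∈ E, ∃ j : Nat, ∃ c, e.toList[j]? = some c ∧ c ∈ pySeps ∧ e.toList.take j = x.toList := by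
  unfold stems_of
  rw [mem_foldl_set (P := fun e x => ∃ j : Nat, ∃ c, e.toList[j]? = some c ∧ c ∈ pySeps ∧ e.toList.take j = x.toList)]
  · simp [PySem.Set.empty]
  · intro s e y
    rw [mem_foldl_set (P := fun p y => pySeps.contains p.2 = true ∧ String.ofList (PySem.List.slice e.toList none (some p.1)) = y)]
    · constructor
      · rintro (hs | ⟨p, hp, hc, rfl⟩)
        · exact Or.inl hs
        · right
          rw [mem_enumerate_iff] at hp
          obtain ⟨j, hj, hpj⟩ := hp
          refine ⟨j, p.2, hj, by simpa using hc, ?_⟩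
          rw [hpj]
          simp [PySem.List.slice_to_natCast]
      · rintro (hs | ⟨j, c, hj, hc, htake⟩)
        · exact Or.inl hs
        · right
          refine ⟨((j : Int), c), ?_, by simpa using hc, ?_⟩
          · rw [mem_enumerate_iff]; exact ⟨j, hj, by omega⟩
          · simp [PySem.List.slice_to_natCast, htake]
    · intro s p y
      split
      · rw [PySem.Set.mem_add]; tauto
      · tauto

def hitProp (E : List String) (m : String) : Prop :=
  m ∈ E ∨ ∃ e ∈ E, ∃ c ∈ pySeps, ((e.toList ++ [c]) <+: m.toList ∨ (m.toList ++ [c]) <+: e.toList)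

theorem A_char (E : List String) (m : String) :
    is_model_exists m E = true ↔ hitProp E m := by
  unfold is_model_exists hitProp
  split
  · rename_i h
    simp only [true_iff]
    simp at h
    exact Or.inl h
  · simp only [List.any_eq_true, Bool.or_eq_true, PySem.Chars.startswith_iff]
    constructor
    · rintro ⟨e, he, (((h | h) | h) | h)⟩
      · exact Or.inr ⟨e, he, '.', by simp [pySeps], Or.inl h⟩
      · exact Or.inr ⟨e, he, '_', by simp [pySeps], Or.inl h⟩
      · exact Or.inr ⟨e, he, '.', by simp [pySeps], Or.inr h⟩
      · exact Or.inr ⟨e, he, '_', by simp [pySeps], Or.inr h⟩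
    · rename_i hnc
      rintro (hm | ⟨e, he, c, hc, h⟩)
      · exact absurd (by simpa using hm) hnc
      · simp [pySeps] at hc
        rcases hc with rfl | rfl <;> [skip; skip] <;>
          exact ⟨e, he, by tauto⟩

theorem B_char (E : List String) (m : String) :
    model_hit (PySem.Set.ofList E) (stems_of E) m = true ↔ hitProp E m := by
  unfold model_hit hitProp
  simp only [Bool.or_eq_true, Bool.and_eq_true, List.any_eq_true, PySem.Set.contains_iff,
    PySem.Set.mem_ofList, mem_stems_iff]
  constructor
  · rintro ((hm | ⟨e, he, j, c, hj, hc, htake⟩) | ⟨p, hp, hc, hmem⟩)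
    · exact Or.inl hm
    · -- a stem of e equals m : existing starts with m + sep
      right
      obtain ⟨hlt, _⟩ := List.getElem?_eq_some_iff.mp hj
      have hlen : m.toList.length = j := by
        rw [← htake, List.length_take]; omega
      refine ⟨e, he, c, hc, Or.inr ?_⟩
      rw [prefix_snoc_iff, hlen]
      exact ⟨htake, hj⟩
    · -- a separator position of m whose prefix is an existing model
      right
      rw [mem_enumerate_iff] at hp
      obtain ⟨j, hj, hpj⟩ := hp
      have hslice : PySem.List.slice m.toList none (some p.1) = m.toList.take j := by
        rw [hpj, zero_add, PySem.List.slice_to_natCast]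
      rw [hslice] at hmem
      obtain ⟨hlt, _⟩ := List.getElem?_eq_some_iff.mp hj
      refine ⟨String.ofList (m.toList.take j), hmem, p.2, by simpa using hc, Or.inl ?_⟩
      rw [prefix_snoc_iff]
      simp only [String.toList_ofList, List.length_take]
      have : min j m.toList.length = j := by omega
      rw [this]
      exact ⟨rfl, hj⟩
  · rintro (hm | ⟨e, he, c, hc, (h | h)⟩)
    · exact Or.inl (Or.inl hm)
    · -- m starts with e + sep : B finds it by scanning m
      right
      rw [prefix_snoc_iff] at h
      obtain ⟨htake, hget⟩ := h
      refine ⟨((e.toList.length : Int), c), ?_, ?_, ?_⟩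
      · rw [mem_enumerate_iff]; exact ⟨e.toList.length, hget, by omega⟩
      · simpa using hc
      · have : PySem.List.slice m.toList none (some ((e.toList.length : Int))) = m.toList.take e.toList.length :=
          PySem.List.slice_to_natCast m.toList e.toList.length
        rw [this, htake]
        simpa using he
    · -- e starts with m + sep : m is a stem of e
      left; right
      rw [prefix_snoc_iff] at h
      obtain ⟨htake, hget⟩ := h
      exact ⟨e, he, m.toList.length, c, hget, hc, htake⟩

theorem hit_eq (E : List String) (m : String) :
    is_model_exists m E = model_hit (PySem.Set.ofList E) (stems_of E) m := by
  rw [Bool.eq_iff_iff, A_char, B_char]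

-- ===== VERDICT (by name: the statement is the Claim_ definition above) =====
theorem filter_missing_models_spec : Claim_equal_filter_missing_models := by
  intro t E _
  unfold Spec_filter_missing_models filter_missing_models filter_missing_models_alt
  congr 1
  funext acc m
  rw [hit_eq]
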